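-- pv_equiv track=rewrite | github.com/LeopardCheetah/acm-poker-bo-___-t | bot.py | is_x
-- ===== SOURCE A (Python) =====
-- def is_x(cards, x):
--     d = {'2': 2, '3': 3, '4': 4, '5': 5, '6': 6, '7': 7, '8': 8, '9': 9, 't': 10, 'j': 11, 'q': 12, 'k': 13, 'a': 14}
--
--     a = []
--     for c in cards:
--         a.append(d[c[0]])
--
--     for i in range(2, 15):
--         if a.count(i) > x - 1:
--             return True
--
--     return False
-- ===== SOURCE B (Python) =====
-- def is_x(cards, x):
--     d = {'2': 2, '3': 3, '4': 4, '5': 5, '6': 6, '7': 7, '8': 8, '9': 9, 't': 10, 'j': 11, 'q': 12, 'k': 13, 'a': 14}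
--     ranks = sorted(d[c[0]] for c in cards)
--     if x <= 0:
--         return True
--     run = 0
--     prev = None
--     for r in ranks:
--         run = run + 1 if r == prev else 1
--         prev = r
--         if run >= x:
--             return True
--     return False
-- ===== Notes on version B (the rewrite author's own statement) =====
-- stated objective: alternative
-- what changed: A maps cards to ranks and runs thirteen separate .count scans (one per rank 2..14); B sorts the mapped ranks once and detects a run of length >= x in a single linear scan over the sorted list (with an explicit x <= 0 short-circuit, since with x <= 0 even an absent rank's count 0 exceeds x-1).
import Mathlib
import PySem

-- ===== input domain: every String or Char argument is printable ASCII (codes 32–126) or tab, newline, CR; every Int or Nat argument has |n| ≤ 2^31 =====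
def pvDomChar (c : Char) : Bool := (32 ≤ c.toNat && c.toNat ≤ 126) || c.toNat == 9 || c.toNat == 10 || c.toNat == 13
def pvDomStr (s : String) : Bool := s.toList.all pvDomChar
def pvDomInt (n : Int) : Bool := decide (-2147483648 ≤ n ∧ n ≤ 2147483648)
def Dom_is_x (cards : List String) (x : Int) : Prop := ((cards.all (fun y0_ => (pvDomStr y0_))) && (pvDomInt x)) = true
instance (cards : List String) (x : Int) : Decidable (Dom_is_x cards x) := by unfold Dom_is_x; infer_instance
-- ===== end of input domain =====

-- B replaces A's thirteen repeated `.count` scans with sort-then-run-scan: sort the mapped ranks once and look for a run of length ≥ x in one linear pass (plus an `x <= 0` short-circuit); same return value on all inputs where A returns.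


-- ===== PORT A =====
-- the literal dict d of both Pythons; keyed by the (single) character c[0]
def rankDict : PySem.Dict Char Int :=
  PySem.Dict.mk [('2', 2), ('3', 3), ('4', 4), ('5', 5), ('6', 6), ('7', 7), ('8', 8),
                 ('9', 9), ('t', 10), ('j', 11), ('q', 12), ('k', 13), ('a', 14)]

-- d[c[0]]; `none` (Python: IndexError / KeyError) is excluded by Pre_ and mapped to 0 here
def rankOf (c : String) : Int :=
  ((PySem.Str.pyGet? c 0).bind (fun ch => rankDict.get? ch)).getD 0

-- the `for i in range(2, 15): if …: return True` loop
def isxLoop (a : List Int) (x : Int) : List Int → Bool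
  | [] => false
  | i :: rest => if (PySem.List.count a i : Int) > x - 1 then true else isxLoop a x rest

def is_x (cards : List String) (x : Int) : Bool :=
  let a : List Int := cards.foldl (fun acc c => acc ++ [rankOf c]) []
  isxLoop a x (PySem.List.pyRange 2 15)

-- ===== PORT B =====
-- the `for r in ranks:` run-detecting loop of Source B (prev starts as None)
def runScan (x : Int) : Option Int → Int → List Int → Bool
  | _, _, [] => false
  | prev, run, r :: rest =>
    let run' := if some r = prev then run + 1 else 1
    if x ≤ run' then true else runScan x (some r) run' rest

def is_x_alt (cards : List String) (x : Int) : Bool :=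
  let ranks : List Int := PySem.List.sorted (cards.map rankOf) (fun r => r) false
  if x ≤ 0 then true else runScan x none 0 ranks

-- ===== PRECONDITION & SPEC =====
-- a card is well-formed when it is nonempty and its first character is a key of d
def cardOK (c : String) : Bool :=
  match PySem.Str.pyGet? c 0 with
  | some ch => rankDict.contains ch
  | none => false

-- Pre_ excludes exactly the inputs where A raises: a card that is the empty string (IndexError)
-- or whose first character is not a key of d (KeyError).
def Pre_is_x (cards : List String) (x : Int) : Prop := (cards.all cardOK) = true
instance (cards : List String) (x : Int) : Decidable (Pre_is_x cards x) := by
  unfold Pre_is_x; infer_instance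

def pvWitness_is_x : List String × Int := (["2h", "ad", "2s"], 2)

def Spec_is_x (cards : List String) (x : Int) (out : Bool) : Prop := out = is_x_alt cards x
instance (cards : List String) (x : Int) (out : Bool) : Decidable (Spec_is_x cards x out) := by
  unfold Spec_is_x; infer_instance

-- ===== CLAIM (what is proved, stated in full; the proofs are below) =====
def Claim_equal_is_x : Prop := ∀ (cards : List String) (x : Int), Dom_is_x cards x → Pre_is_x cards x → Spec_is_x cards x (is_x cards x)

-- ===== LEMMAS AND PROOFS =====

lemma isxLoop_eq_any (a : List Int) (x : Int) (l : List Int) :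
    isxLoop a x l = l.any (fun i => decide ((PySem.List.count a i : Int) > x - 1)) := by
  induction l with
  | nil => rfl
  | cons i rest ih =>
    simp only [isxLoop, List.any_cons, ih]
    rcases Classical.em ((PySem.List.count a i : Int) > x - 1) with h | h
    · simp only [if_pos h, decide_eq_true h, Bool.true_or]
    · simp only [if_neg h, decide_eq_false h, Bool.false_or]

lemma rankOf_mem_range (c : String) (h : cardOK c = true) :
    2 ≤ rankOf c ∧ rankOf c < 15 := by
  unfold cardOK at h
  unfold rankOf
  rcases hg : PySem.Str.pyGet? c 0 with _ | ch <;> rw [hg] at h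
  · simp at h
  · simp only [Option.bind_some]
    simp only [PySem.Dict.contains_mk, rankDict] at h
    simp only [List.any_cons, List.any_nil, Bool.or_eq_true, beq_iff_eq] at h
    rcases h with h|h|h|h|h|h|h|h|h|h|h|h|h|h <;> first
      | (subst h; decide)
      | exact absurd h (by simp)

-- count of r in a::rest when r ≠ a
lemma count_cons_ne (a r : Int) (rest : List Int) (h : ¬ r = a) :
    (a :: rest).count r = rest.count r := by
  rw [List.count_cons]; simp [beq_iff_eq, Ne.symm h]

-- invariant of the run loop: prev = some p, run = k, everything in s is ≥ p, k < x
lemma scan_some (x : Int) : ∀ (s : List Int), s.Pairwise (· ≤ ·) → ∀ (p k : Int),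
    (∀ r ∈ s, p ≤ r) → 1 ≤ k → k < x →
    (runScan x (some p) k s = true ↔
      x ≤ k + (s.count p : Int) ∨ ∃ r ∈ s, x ≤ (s.count r : Int)) := by
  intro s
  induction s with
  | nil =>
    intro _ p k _ hk hkx
    simp [runScan]; omega
  | cons a rest ih =>
    intro hpair p k hge hk hkx
    have hpair' : rest.Pairwise (· ≤ ·) := hpair.of_cons
    have hale : ∀ r ∈ rest, a ≤ r := fun r hr => List.rel_of_pairwise_cons hpair hr
    by_cases hap : a = p
    · subst hap
      have hstep : runScan x (some a) k (a :: rest)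
          = if x ≤ k + 1 then true else runScan x (some a) (k + 1) rest := by
        simp [runScan]
      rw [hstep]
      have hcnt : (a :: rest).count a = rest.count a + 1 := by simp
      by_cases hx1 : x ≤ k + 1
      · simp only [if_pos hx1, true_iff]
        left; omega
      · rw [if_neg hx1, ih hpair' a (k + 1) hale (by omega) (by omega)]
        constructor
        · rintro (h | ⟨r, hr, hcr⟩)
          · left; omega
          · by_cases hra : r = a
            · subst hra; left; omega
            · right
              refine ⟨r, List.mem_cons_of_mem _ hr, ?_⟩
              rw [count_cons_ne a r rest hra]; exact hcr
        · rintro (h | ⟨r, hr, hcr⟩)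
          · left; omega
          · rcases List.mem_cons.mp hr with hra | hr'
            · subst hra; left; omega
            · by_cases hra : r = a
              · subst hra; left; omega
              · right
                rw [count_cons_ne a r rest hra] at hcr
                exact ⟨r, hr', hcr⟩
    · have hpa : p < a := lt_of_le_of_ne (hge a (by simp)) (fun h => hap h.symm)
      have hpnot : p ∉ a :: rest := by
        intro hmem
        rcases List.mem_cons.mp hmem with h | h
        · exact absurd h.symm (by omega)
        · exact absurd (hale p h) (by omega)
      have hc0 : (a :: rest).count p = 0 := List.count_eq_zero.mpr hpnot
      have hstep : runScan x (some p) k (a :: rest)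
          = if x ≤ 1 then true else runScan x (some a) 1 rest := by
        simp [runScan, hap]
      rw [hstep]
      have hcnt : (a :: rest).count a = rest.count a + 1 := by simp
      by_cases hx1 : x ≤ 1
      · simp only [if_pos hx1, true_iff]
        right
        refine ⟨a, by simp, ?_⟩
        omega
      · rw [if_neg hx1, ih hpair' a 1 hale (le_refl 1) (by omega)]
        constructor
        · rintro (h | ⟨r, hr, hcr⟩)
          · right; exact ⟨a, by simp, by omega⟩
          · by_cases hra : r = a
            · subst hra; right; exact ⟨r, by simp, by omega⟩
            · right
              refine ⟨r, List.mem_cons_of_mem _ hr, ?_⟩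
              rw [count_cons_ne a r rest hra]; exact hcr
        · rintro (h | ⟨r, hr, hcr⟩)
          · omega
          · rcases List.mem_cons.mp hr with hra | hr'
            · subst hra; left; omega
            · by_cases hra : r = a
              · subst hra; left; omega
              · right
                rw [count_cons_ne a r rest hra] at hcr
                exact ⟨r, hr', hcr⟩

-- the whole loop on a sorted list: a run of length ≥ x exists iff some element occurs ≥ x times
lemma scan_none (x : Int) (hx : 1 ≤ x) (s : List Int) (hpair : s.Pairwise (· ≤ ·)) :
    (runScan x none 0 s = true ↔ ∃ r ∈ s, x ≤ (s.count r : Int)) := by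
  cases s with
  | nil => simp [runScan]
  | cons a rest =>
    have hpair' : rest.Pairwise (· ≤ ·) := hpair.of_cons
    have hale : ∀ r ∈ rest, a ≤ r := fun r hr => List.rel_of_pairwise_cons hpair hr
    have hcnt : (a :: rest).count a = rest.count a + 1 := by simp
    have hstep : runScan x none 0 (a :: rest)
        = if x ≤ 1 then true else runScan x (some a) 1 rest := by
      simp [runScan]
    rw [hstep]
    by_cases hx1 : x ≤ 1
    · simp only [if_pos hx1, true_iff]
      exact ⟨a, by simp, by omega⟩
    · rw [if_neg hx1, scan_some x rest hpair' a 1 hale (le_refl 1) (by omega)]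
      constructor
      · rintro (h | ⟨r, hr, hcr⟩)
        · exact ⟨a, by simp, by omega⟩
        · by_cases hra : r = a
          · subst hra; exact ⟨r, by simp, by omega⟩
          · refine ⟨r, List.mem_cons_of_mem _ hr, ?_⟩
            rw [count_cons_ne a r rest hra]; exact hcr
      · rintro ⟨r, hr, hcr⟩
        rcases List.mem_cons.mp hr with hra | hr'
        · subst hra; left; omega
        · by_cases hra : r = a
          · subst hra; left; omega
          · right
            rw [count_cons_ne a r rest hra] at hcr
            exact ⟨r, hr', hcr⟩

-- ===== VERDICT (by name: the statement is the Claim_ definition above) =====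
theorem is_x_spec : Claim_equal_is_x := by
  intro cards x _ hpre
  unfold Spec_is_x is_x is_x_alt
  rw [PySem.List.foldl_append_singleton_eq_map]
  simp only [List.nil_append]
  set ranks := cards.map rankOf with hranks
  rw [isxLoop_eq_any]
  by_cases hx : x ≤ 0
  · rw [if_pos hx]
    have h2 : (2 : Int) ∈ PySem.List.pyRange 2 15 := by
      rw [PySem.List.mem_pyRange_one]; omega
    rw [List.any_eq_true]
    exact ⟨2, h2, by simp; omega⟩
  · rw [if_neg hx]
    set s := PySem.List.sorted ranks (fun r => r) false with hs
    have hperm : s.Perm ranks := PySem.List.sorted_perm ranks (fun r => r) false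
    have hpair : s.Pairwise (· ≤ ·) := by
      have := PySem.List.sorted_pairwise ranks (fun r => r)
      simpa using this
    rw [Bool.eq_iff_iff]
    rw [scan_none x (by omega) s hpair]
    simp only [List.any_eq_true, decide_eq_true_eq]
    constructor
    · rintro ⟨i, _, hgt⟩
      rw [PySem.List.count_eq] at hgt
      have hpos : 0 < ranks.count i := by omega
      have hmem : i ∈ ranks := List.count_pos_iff.mp hpos
      exact ⟨i, hperm.mem_iff.mpr hmem, by rw [hperm.count_eq]; omega⟩
    · rintro ⟨r, hr, hcr⟩
      have hmem : r ∈ ranks := hperm.mem_iff.mp hr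
      rcases List.mem_map.mp hmem with ⟨c, hc, rfl⟩
      have hcard := (List.all_eq_true.mp hpre) c hc
      have hb := rankOf_mem_range c hcard
      refine ⟨rankOf c, PySem.List.mem_pyRange_one.mpr ⟨hb.1, hb.2⟩, ?_⟩
      rw [PySem.List.count_eq, ← hperm.count_eq]
      omega
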